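-- pv_equiv track=rewrite | github.com/0xGeekHub/pixcode | src/old-pixcode.py | decodeHexCodes
-- ===== SOURCE A (Python) =====
-- def decodeHexCodes(hexArray):
--     hexArray = hexArray[::-1]
--     newHexArray = []
--     done = False
--     for i in hexArray:
--         if (i == "000000" and done == False):
--             continue
--         else:
--             done = True
--             newHexArray.append(i)
--     newHexArray = newHexArray[::-1]
--     newHexArray.pop()
--     segment = newHexArray[len(newHexArray) - 1]
--     if (str(segment[len(segment) - 4::]) == "a0b1"):
--         newHexArray[len(newHexArray) - 1] = segment[0:len(segment) - 4]
--     elif (str(segment[len(segment) - 2::]) == "b1"):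
--         newHexArray[len(newHexArray) - 1] = segment[0:len(segment) - 2]
--     return arrayToString(newHexArray)
--
-- def arrayToString(a):
--     _str = ""
--     for i in a:
--         _str += i
--     return _str
-- ===== SOURCE B (Python) =====
-- def decodeHexCodes(hexArray):
--     # single backward pass, state machine; pieces collected once, joined at the end
--     out = []
--     state = 0  # 0: trimming trailing "000000", 1: dropping terminator code, 2: copying
--     for code in reversed(hexArray):
--         if state == 0:
--             if code == "000000":
--                 continue
--             state = 1              # this code is the terminator: dropped
--         elif state == 1:
--             if code.endswith("a0b1"):
--                 code = code[:-4]
--             elif code.endswith("b1"):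
--                 code = code[:-2]
--             out.append(code)
--             state = 2
--         else:
--             out.append(code)
--     return "".join(reversed(out))
-- ===== Notes on version B (the rewrite author's own statement) =====
-- stated objective: alternative
-- what changed: A makes staged passes over lists (reverse, a done-flag filter loop into a new list, reverse back, pop, in-place mutation of the last element, then an accumulator-concat helper); B is one fused backward pass with a 3-state machine (trim / drop-terminator / copy) that collects the output pieces as it goes and joins them once at the end, with no reversal-and-filter staging, no mutation and no helper.
-- outside the precondition, e.g. on decodeHexCodes([]): A raises IndexError, B returns ''
import Mathlib
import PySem

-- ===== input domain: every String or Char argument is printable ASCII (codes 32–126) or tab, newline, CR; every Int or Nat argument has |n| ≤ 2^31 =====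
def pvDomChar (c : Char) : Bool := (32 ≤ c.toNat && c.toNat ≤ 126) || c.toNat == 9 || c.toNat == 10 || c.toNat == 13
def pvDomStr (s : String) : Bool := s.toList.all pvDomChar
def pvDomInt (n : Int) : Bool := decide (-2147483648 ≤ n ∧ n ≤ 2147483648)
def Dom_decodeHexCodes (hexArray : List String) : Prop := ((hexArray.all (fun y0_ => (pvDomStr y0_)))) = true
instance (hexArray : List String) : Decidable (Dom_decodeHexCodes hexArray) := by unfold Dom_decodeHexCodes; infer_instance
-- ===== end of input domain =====

-- B replaces A's staged list passes (reverse, flag-filter, reverse, pop, set-last, concat helper)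
-- by one fused backward pass with a 3-state machine building the string directly (objective: alternative);
-- return value only, A mutates nothing observable.


-- ===== PORT A =====
-- _str += i : string concatenation, exact on code points
def arrayToString (a : List String) : String :=
  a.foldl (fun s i => s ++ i) ""

def decodeHexCodes (hexArray : List String) : String :=
  -- hexArray = hexArray[::-1]  (step -1 slice = reverse)
  let hexArray := (PySem.List.slice? hexArray none none (-1)).getD []
  -- for i in hexArray: skip "000000" until done, then append everything
  let st := hexArray.foldl
    (fun (st : Bool × List String) i =>
      if i == "000000" && st.1 == false then st else (true, st.2 ++ [i]))
    (false, [])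
  -- newHexArray = newHexArray[::-1]
  let newHexArray := (PySem.List.slice? st.2 none none (-1)).getD []
  -- newHexArray.pop()  (IndexError when empty: excluded by Pre_)
  match PySem.List.pop? newHexArray with
  | none => ""
  | some (_, newHexArray) =>
    -- segment = newHexArray[len(newHexArray) - 1]  (IndexError when empty: excluded by Pre_)
    match PySem.List.pyGet? newHexArray ((newHexArray.length : Int) - 1) with
    | none => ""
    | some segment =>
      let seg := segment.toList
      if PySem.Chars.slice seg (some ((seg.length : Int) - 4)) none == "a0b1".toList then
        arrayToString (PySem.List.pySetD newHexArray ((newHexArray.length : Int) - 1)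
          (String.ofList (PySem.Chars.slice seg (some 0) (some ((seg.length : Int) - 4)))))
      else if PySem.Chars.slice seg (some ((seg.length : Int) - 2)) none == "b1".toList then
        arrayToString (PySem.List.pySetD newHexArray ((newHexArray.length : Int) - 1)
          (String.ofList (PySem.Chars.slice seg (some 0) (some ((seg.length : Int) - 2)))))
      else arrayToString newHexArray

-- ===== PORT B =====
-- state-1 body of Source B's loop: strip the suffix marker via endswith / negative-end slices
def pvStripSeg (code : String) : String :=
  if PySem.Chars.endswith code.toList "a0b1".toList then
    String.ofList (PySem.Chars.slice code.toList none (some (-4)))   -- code[:-4]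
  else if PySem.Chars.endswith code.toList "b1".toList then
    String.ofList (PySem.Chars.slice code.toList none (some (-2)))   -- code[:-2]
  else code

-- the loop body of Source B: state 0 trims "000000", state 1 drops the terminator and
-- appends the stripped segment, state 2 appends each remaining code
def pvStep (st : Nat × List String) (code : String) : Nat × List String :=
  if st.1 == 0 then
    (if code == "000000" then st else (1, st.2))
  else if st.1 == 1 then (2, st.2 ++ [pvStripSeg code])
  else (st.1, st.2 ++ [code])

def decodeHexCodes_alt (hexArray : List String) : String :=
  -- for code in reversed(hexArray): … ; return "".join(reversed(out))
  PySem.Str.join "" ((hexArray.reverse.foldl pvStep (0, [])).2).reverse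

-- ===== PRECONDITION & SPEC =====
-- A raises IndexError (pop() on [] or indexing []) exactly when fewer than 2 codes remain
-- after trimming trailing "000000"; those inputs are excluded.
def Pre_decodeHexCodes (hexArray : List String) : Prop :=
  2 ≤ (hexArray.reverse.dropWhile (fun s => s == "000000")).length
instance (hexArray : List String) : Decidable (Pre_decodeHexCodes hexArray) := by
  unfold Pre_decodeHexCodes; infer_instance
def pvWitness_decodeHexCodes : List String := ["6869", "a0b1", "000000"]

def Spec_decodeHexCodes (hexArray : List String) (out : String) : Prop := out = decodeHexCodes_alt hexArray
instance (hexArray : List String) (out : String) : Decidable (Spec_decodeHexCodes hexArray out) := by unfold Spec_decodeHexCodes; infer_instance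

-- ===== CLAIM (what is proved, stated in full; the proofs are below) =====
def Claim_equal_decodeHexCodes : Prop := ∀ (hexArray : List String), Dom_decodeHexCodes hexArray → Pre_decodeHexCodes hexArray → Spec_decodeHexCodes hexArray (decodeHexCodes hexArray)

-- ===== LEMMAS AND PROOFS =====

-- dropWhile's first survivor fails the predicate
lemma pvDropWhile_head_false {α : Type} (p : α → Bool) (l : List α) (z : α) (t : List α)
    (hD : List.dropWhile p l = z :: t) : p z = false := by
  induction l with
  | nil => simp at hD
  | cons a l ih =>
    rw [List.dropWhile_cons] at hD
    by_cases h : p a = true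
    · rw [if_pos h] at hD; exact ih hD
    · rw [if_neg h] at hD
      cases hD
      simpa using h

-- A's flag loop, once done, copies the rest
lemma pvFoldTrue (l : List String) (acc : List String) :
    l.foldl (fun (st : Bool × List String) i =>
      if i == "000000" && st.1 == false then st else (true, st.2 ++ [i])) (true, acc)
    = (true, acc ++ l) := by
  induction l generalizing acc with
  | nil => simp
  | cons a l ih =>
    rw [List.foldl_cons,
      show (if (a == "000000" && (true : Bool) == false) = true then ((true, acc) : Bool × List String)
        else (true, acc ++ [a])) = (true, acc ++ [a]) by simp, ih]
    simp

-- A's flag loop from the initial state is dropWhile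
lemma pvFoldDrop (l : List String) :
    (l.foldl (fun (st : Bool × List String) i =>
      if i == "000000" && st.1 == false then st else (true, st.2 ++ [i])) (false, [])).2
    = l.dropWhile (fun s => s == "000000") := by
  induction l with
  | nil => rfl
  | cons a l ih =>
    by_cases h : a = "000000"
    · simpa [h] using ih
    · rw [List.foldl_cons,
        show (if (a == "000000" && (false : Bool) == false) = true then ((false, []) : Bool × List String)
          else (true, [] ++ [a])) = (true, [a]) by simp [h], pvFoldTrue]
      simp [h]

-- "".join is flatten on code points
lemma pvJoinNil (xs : List (List Char)) : PySem.Chars.join [] xs = xs.flatten := by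
  induction xs with
  | nil => rfl
  | cons a l ih =>
    cases l with
    | nil => simp [PySem.Chars.join_singleton]
    | cons b r => rw [PySem.Chars.join_cons_cons]; simp_all

-- A's accumulator concat is the flattened code points
lemma pvArrayToString_foldl (a : List String) (s : String) :
    a.foldl (fun x i => x ++ i) s = s ++ String.ofList (a.map String.toList).flatten := by
  induction a generalizing s with
  | nil => simp
  | cons x l ih =>
    simp only [List.foldl_cons, ih, List.map_cons, List.flatten_cons]
    apply String.toList_inj.mp
    simp

-- "".join computes exactly A's accumulator concat
lemma pvJoin_eq (l : List String) : PySem.Str.join "" l = arrayToString l := by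
  unfold arrayToString
  rw [pvArrayToString_foldl]
  apply String.toList_inj.mp
  simp [PySem.Str.join, pvJoinNil]

-- B's machine in state 0 skips the "000000" prefix
lemma pvStep_drop (l : List String) :
    l.foldl pvStep (0, []) = (l.dropWhile (fun s => s == "000000")).foldl pvStep (0, []) := by
  induction l with
  | nil => rfl
  | cons a l ih =>
    by_cases h : a = "000000"
    · simpa [pvStep, h] using ih
    · simp [h]

-- B's machine in state 2 appends every remaining code
lemma pvStep_copy (l : List String) (o : List String) :
    l.foldl pvStep (2, o) = (2, o ++ l) := by
  induction l generalizing o with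
  | nil => simp
  | cons a l ih =>
    rw [List.foldl_cons, show pvStep (2, o) a = (2, o ++ [a]) from rfl, ih]
    simp

-- A's tail-slice comparison is endswith
lemma pvSliceSuffix (cs q : List Char) (hq : 0 < q.length) :
    (PySem.Chars.slice cs (some ((cs.length : Int) - (q.length : Int))) none == q)
    = PySem.Chars.endswith cs q := by
  by_cases h : q.length ≤ cs.length
  · have hc : ((cs.length : Int) - (q.length : Int)) = ((cs.length - q.length : Nat) : Int) := by
      omega
    rw [PySem.Chars.slice_eq_listSlice, hc, PySem.List.slice_from_natCast]
    by_cases hs : PySem.Chars.endswith cs q = true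
    · rw [hs, beq_iff_eq]
      rw [PySem.Chars.endswith_iff] at hs
      obtain ⟨t, rfl⟩ := hs
      simp
    · rw [Bool.not_eq_true] at hs
      rw [hs, beq_eq_false_iff_ne]
      intro hdrop
      have : q <:+ cs := by rw [← hdrop]; exact List.drop_suffix _ _
      rw [← PySem.Chars.endswith_iff] at this
      simp [this] at hs
  · have hneg : ((cs.length : Int) - (q.length : Int)) = -(((q.length - cs.length : Nat)) : Int) := by
      omega
    rw [PySem.Chars.slice_eq_listSlice, hneg, PySem.List.slice_some_none,
      PySem.List.clampIdx_neg_natCast _ _ (by omega)]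
    have hlen : (cs.drop (cs.length - (q.length - cs.length))).length < q.length := by
      simp [List.length_drop]; omega
    have h1 : (cs.drop (cs.length - (q.length - cs.length)) == q) = false := by
      rw [beq_eq_false_iff_ne]
      intro hEq; rw [hEq] at hlen; omega
    have h2 : PySem.Chars.endswith cs q = false := by
      rw [← Bool.not_eq_true, PySem.Chars.endswith_iff]
      intro hsuf
      have := hsuf.length_le
      omega
    rw [h1, h2]

-- the two tail tests, specialised to A's literal offsets
lemma pvSlice4 (cs : List Char) :
    (PySem.Chars.slice cs (some ((cs.length : Int) - 4)) none == "a0b1".toList)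
    = PySem.Chars.endswith cs "a0b1".toList := by
  have h := pvSliceSuffix cs "a0b1".toList (by decide)
  rw [show ((("a0b1".toList.length : Nat)) : Int) = 4 from by decide] at h
  exact h

lemma pvSlice2 (cs : List Char) :
    (PySem.Chars.slice cs (some ((cs.length : Int) - 2)) none == "b1".toList)
    = PySem.Chars.endswith cs "b1".toList := by
  have h := pvSliceSuffix cs "b1".toList (by decide)
  rw [show ((("b1".toList.length : Nat)) : Int) = 2 from by decide] at h
  exact h

-- A's head-slice equals B's negative-end slice once the suffix is known to fit
lemma pvStrip4 (cs : List Char) (h : PySem.Chars.endswith cs "a0b1".toList = true) :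
    PySem.Chars.slice cs (some 0) (some ((cs.length : Int) - 4))
    = PySem.Chars.slice cs none (some (-4)) := by
  have h4 : ("a0b1".toList).length = 4 := by decide
  rw [PySem.Chars.endswith_iff] at h
  have hlen : 4 ≤ cs.length := h4 ▸ h.length_le
  rw [PySem.Chars.slice_eq_listSlice, PySem.Chars.slice_eq_listSlice, PySem.List.slice_zero_start,
    PySem.List.slice_to_neg_ofNat cs 4 (by omega),
    show ((cs.length : Int) - 4) = ((cs.length - 4 : Nat) : Int) from by omega,
    PySem.List.slice_to_natCast]

lemma pvStrip2 (cs : List Char) (h : PySem.Chars.endswith cs "b1".toList = true) :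
    PySem.Chars.slice cs (some 0) (some ((cs.length : Int) - 2))
    = PySem.Chars.slice cs none (some (-2)) := by
  have h2 : ("b1".toList).length = 2 := by decide
  rw [PySem.Chars.endswith_iff] at h
  have hlen : 2 ≤ cs.length := h2 ▸ h.length_le
  rw [PySem.Chars.slice_eq_listSlice, PySem.Chars.slice_eq_listSlice, PySem.List.slice_zero_start,
    PySem.List.slice_to_neg_ofNat cs 2 (by omega),
    show ((cs.length : Int) - 2) = ((cs.length - 2 : Nat) : Int) from by omega,
    PySem.List.slice_to_natCast]

-- ===== VERDICT (by name: the statement is the Claim_ definition above) =====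
theorem decodeHexCodes_spec : Claim_equal_decodeHexCodes := by
  intro hexArray _ hpre
  unfold Pre_decodeHexCodes at hpre
  unfold Spec_decodeHexCodes decodeHexCodes decodeHexCodes_alt
  simp only [PySem.List.slice?_none_none_neg_one, Option.getD_some, pvFoldDrop]
  rw [pvStep_drop]
  obtain ⟨z, s, r, hD⟩ : ∃ z s r,
      hexArray.reverse.dropWhile (fun t => t == "000000") = z :: s :: r := by
    match hE : hexArray.reverse.dropWhile (fun t => t == "000000") with
    | [] => rw [hE] at hpre; simp at hpre
    | [a] => rw [hE] at hpre; simp at hpre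
    | a :: b :: t => exact ⟨a, b, t, rfl⟩
  have hz : z ≠ "000000" := by
    simpa using pvDropWhile_head_false _ _ _ _ hD
  rw [hD]
  -- B side: run the machine through z, s, then copy r
  rw [List.foldl_cons, show pvStep (0, ([] : List String)) z = (1, []) from by simp [pvStep, hz],
    List.foldl_cons, show pvStep (1, ([] : List String)) s = (2, [pvStripSeg s]) from rfl,
    pvStep_copy,
    show (((2 : Nat), [pvStripSeg s] ++ r)).2 = [pvStripSeg s] ++ r from rfl,
    show ([pvStripSeg s] ++ r).reverse = r.reverse ++ [pvStripSeg s] from by simp,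
    pvJoin_eq]
  -- A side: the trimmed-and-reversed list is r.reverse ++ [s] ++ [z]
  rw [show (z :: s :: r).reverse = (r.reverse ++ [s]) ++ [z] from by simp]
  simp only [PySem.List.pop?_last]
  simp only [List.length_append, List.length_cons, List.length_nil, Nat.cast_add, Nat.cast_one, zero_add, add_sub_cancel_right]
  rw [PySem.List.pyGet?_append_length]
  simp only [PySem.List.pySetD_natCast, pvSlice4, pvSlice2]
  by_cases h4 : PySem.Chars.endswith s.toList "a0b1".toList = true
  · rw [if_pos h4, pvStrip4 _ h4,
      show (r.reverse ++ [s]).set r.reverse.length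
          (String.ofList (PySem.Chars.slice s.toList none (some (-4)))) =
        r.reverse ++ [String.ofList (PySem.Chars.slice s.toList none (some (-4)))] from by simp]
    simp [pvStripSeg, show PySem.Chars.endswith s.toList ['a', '0', 'b', '1'] = true from h4]
  · rw [Bool.not_eq_true] at h4
    rw [if_neg (by simpa using h4)]
    by_cases h2 : PySem.Chars.endswith s.toList "b1".toList = true
    · rw [if_pos h2, pvStrip2 _ h2,
        show (r.reverse ++ [s]).set r.reverse.length
            (String.ofList (PySem.Chars.slice s.toList none (some (-2)))) =
          r.reverse ++ [String.ofList (PySem.Chars.slice s.toList none (some (-2)))] from by simp]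
      simp [pvStripSeg, show PySem.Chars.endswith s.toList ['a', '0', 'b', '1'] = false from h4,
        show PySem.Chars.endswith s.toList ['b', '1'] = true from h2]
    · rw [Bool.not_eq_true] at h2
      rw [if_neg (by simpa using h2)]
      simp [pvStripSeg, show PySem.Chars.endswith s.toList ['a', '0', 'b', '1'] = false from h4,
        show PySem.Chars.endswith s.toList ['b', '1'] = false from h2]
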